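-- pv_equiv track=rewrite | github.com/Gwakcy0/algol2 | land_dispute.py | num_possible_cases
-- ===== SOURCE A (Python) =====
-- def check_conflict(arr1, offset1, arr2, offset2):
--     ln = min(len(arr1)-offset1, len(arr2)-offset2)
--     for i in range(ln):
--         if arr1[offset1 + i] + arr2[offset2 + i] == 4:
--             return True
--     return False
--
-- def num_possible_cases(pr):
--     """
--     There are k - m + 1 possible cases for m
--     and k - n + 1 cases for n
--
--     Let Taekang starts from index i, Seungjun from index j,
--     where i is in range(k-m+1) and j is in range(k-n+1).
--     Two areas are allocated without conflict if
--         m_list[p-i] + n_list[p-j] < 3 for all p in range(k)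
--
--     For other approach, we can compute the relative position of two lands first,
--     and then compute number of cases according to the remaining margin.
--     """
--     match_count = 0
--     m, n, k, m_list, n_list = pr
--
--     for i in range(k - m + 1):
--         if not check_conflict(m_list, 0, n_list, i):
--             total_len = max(m+i, n)
--             match_count += (k - total_len + 1)
--     for j in range(1, k - n + 1):
--         if not check_conflict(m_list, j, n_list, 0):
--             total_len = max(m, n+j)
--             match_count += (k - total_len + 1)
--
--     return match_count % 1234567890
-- ===== SOURCE B (Python) =====
-- def num_possible_cases(pr):
--     # Index n_list positions by cell value once; enumerate only the cell pairs that
--     # actually sum to 4 to collect the conflicting relative shifts into a set,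
--     # then sum the placement margins over the non-conflicting shifts.
--     m, n, k, m_list, n_list = pr
--     pos = {}
--     for q, b in enumerate(n_list):
--         pos.setdefault(b, []).append(q)
--     bad = set()
--     for p, a in enumerate(m_list):
--         for q in pos.get(4 - a, []):
--             bad.add(q - p)
--     total = 0
--     for i in range(k - m + 1):
--         if i not in bad:
--             total += k + 1 - max(m + i, n)
--     for j in range(1, k - n + 1):
--         if -j not in bad:
--             total += k + 1 - max(m, n + j)
--     return total % 1234567890
-- ===== Notes on version B (the rewrite author's own statement) =====
-- stated objective: alternative
-- what changed: Instead of re-scanning the overlap of the two strips for every relative shift, B indexes n_list positions by cell value once, enumerates only the cell pairs that sum to 4 to build the set of conflicting shifts, and then sums the placement margins over shifts not in that set.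
import Mathlib
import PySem

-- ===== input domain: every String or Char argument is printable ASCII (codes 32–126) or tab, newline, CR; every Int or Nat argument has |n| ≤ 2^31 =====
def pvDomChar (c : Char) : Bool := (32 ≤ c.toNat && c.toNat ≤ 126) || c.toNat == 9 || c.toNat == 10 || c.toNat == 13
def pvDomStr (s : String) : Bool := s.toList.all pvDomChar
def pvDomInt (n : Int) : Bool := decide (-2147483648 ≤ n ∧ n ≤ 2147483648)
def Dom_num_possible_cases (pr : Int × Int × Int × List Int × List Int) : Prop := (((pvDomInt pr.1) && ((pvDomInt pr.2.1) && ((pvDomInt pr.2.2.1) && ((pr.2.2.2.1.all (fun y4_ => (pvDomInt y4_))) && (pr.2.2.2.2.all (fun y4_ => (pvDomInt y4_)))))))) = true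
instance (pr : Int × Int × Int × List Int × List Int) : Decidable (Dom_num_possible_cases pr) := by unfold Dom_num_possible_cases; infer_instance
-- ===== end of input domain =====

-- B replaces A's per-shift conflict re-scan by a value-indexed enumeration of just the cell
-- pairs summing to 4, collecting the conflicting relative shifts into a set
-- (objective: alternative algorithm).

-- ===== PORT A =====
-- Indices offset1+i / offset2+i are in range at every call site (offsets ≥ 0, i < ln),
-- so pyGetD is exact here (Python never raises in these calls).
def check_conflict (arr1 : List Int) (offset1 : Int) (arr2 : List Int) (offset2 : Int) : Bool :=
  let ln : Int := min ((arr1.length : Int) - offset1) ((arr2.length : Int) - offset2)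
  (PySem.List.pyRange 0 ln 1).any (fun i =>
    PySem.List.pyGetD arr1 (offset1 + i) 0 + PySem.List.pyGetD arr2 (offset2 + i) 0 == 4)

def num_possible_cases (pr : Int × Int × Int × List Int × List Int) : Int :=
  match pr with
  | (m, n, k, m_list, n_list) =>
    let mc1 : Int := (PySem.List.pyRange 0 (k - m + 1) 1).foldl (fun acc i =>
      if !check_conflict m_list 0 n_list i then acc + (k - max (m + i) n + 1) else acc) 0
    let mc2 : Int := (PySem.List.pyRange 1 (k - n + 1) 1).foldl (fun acc j =>
      if !check_conflict m_list j n_list 0 then acc + (k - max m (n + j) + 1) else acc) mc1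
    PySem.Int.mod mc2 1234567890

-- ===== PORT B =====
-- pos = {}; for q, b in enumerate(n_list): pos.setdefault(b, []).append(q)
def posDict (nl : List Int) : PySem.Dict Int (List Int) :=
  (PySem.List.enumerate nl).foldl
    (fun d qb => d.insert qb.2 (PySem.Dict.getD d qb.2 [] ++ [qb.1])) PySem.Dict.empty

-- bad = set(); for p, a in enumerate(m_list): for q in pos.get(4 - a, []): bad.add(q - p)
def badShifts (ml nl : List Int) : PySem.Set Int :=
  let pos := posDict nl
  (PySem.List.enumerate ml).foldl (fun s pa =>
    (PySem.Dict.getD pos (4 - pa.2) []).foldl (fun s q => PySem.Set.add s (q - pa.1)) s)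
    PySem.Set.empty

def num_possible_cases_alt (pr : Int × Int × Int × List Int × List Int) : Int :=
  match pr with
  | (m, n, k, m_list, n_list) =>
    let bad := badShifts m_list n_list
    let t1 : Int := (PySem.List.pyRange 0 (k - m + 1) 1).foldl (fun acc i =>
      if !PySem.Set.contains bad i then acc + (k + 1 - max (m + i) n) else acc) 0
    let t2 : Int := (PySem.List.pyRange 1 (k - n + 1) 1).foldl (fun acc j =>
      if !PySem.Set.contains bad (-j) then acc + (k + 1 - max m (n + j)) else acc) t1
    PySem.Int.mod t2 1234567890

-- ===== PRECONDITION & SPEC =====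
def Spec_num_possible_cases (pr : Int × Int × Int × List Int × List Int) (out : Int) : Prop := out = num_possible_cases_alt pr
instance (pr : Int × Int × Int × List Int × List Int) (out : Int) : Decidable (Spec_num_possible_cases pr out) := by unfold Spec_num_possible_cases; infer_instance

-- ===== CLAIM (what is proved, stated in full; the proofs are below) =====
def Claim_equal_num_possible_cases : Prop := ∀ (pr : Int × Int × Int × List Int × List Int), Dom_num_possible_cases pr → Spec_num_possible_cases pr (num_possible_cases pr)

-- ===== LEMMAS AND PROOFS =====

-- a relative shift d (start of n_list minus start of m_list) is conflicting
def ConflictAt (ml nl : List Int) (d : Int) : Prop :=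
  ∃ pa ∈ PySem.List.enumerate ml, ∃ qb ∈ PySem.List.enumerate nl,
    pa.2 + qb.2 = 4 ∧ d = qb.1 - pa.1

lemma mem_foldl_iff {α β : Type} (g : List β → α → List β) (Q : α → β → Prop)
    (h : ∀ s e x, x ∈ g s e ↔ x ∈ s ∨ Q e x) (l : List α) (s0 : List β) (x : β) :
    x ∈ l.foldl g s0 ↔ x ∈ s0 ∨ ∃ e ∈ l, Q e x := by
  induction l generalizing s0 with
  | nil => simp
  | cons a t ih =>
    simp only [List.foldl_cons, ih, h, List.mem_cons]
    constructor
    · rintro ((hs | hq) | ⟨e, he, hq⟩)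
      · exact Or.inl hs
      · exact Or.inr ⟨a, Or.inl rfl, hq⟩
      · exact Or.inr ⟨e, Or.inr he, hq⟩
    · rintro (hs | ⟨e, (rfl | he), hq⟩)
      · exact Or.inl (Or.inl hs)
      · exact Or.inl (Or.inr hq)
      · exact Or.inr ⟨e, he, hq⟩

lemma getD_posDict (nl : List Int) (v : Int) :
    PySem.Dict.getD (posDict nl) v []
      = ((PySem.List.enumerate nl).filter (fun qb => qb.2 == v)).map (fun qb => qb.1) := by
  suffices h : ∀ (l : List (Int × Int)) (d : PySem.Dict Int (List Int)) (v : Int),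
      PySem.Dict.getD (l.foldl (fun d qb => d.insert qb.2 (PySem.Dict.getD d qb.2 [] ++ [qb.1])) d) v []
        = PySem.Dict.getD d v [] ++ (l.filter (fun qb => qb.2 == v)).map (fun qb => qb.1) by
    simpa [posDict, PySem.Dict.getD_empty] using h (PySem.List.enumerate nl) PySem.Dict.empty v
  intro l
  induction l with
  | nil => simp
  | cons qb t ih =>
    intro d v
    simp only [List.foldl_cons, ih, List.filter_cons]
    rw [PySem.Dict.getD_insert]
    by_cases hv : v = qb.2
    · simp [hv, List.append_assoc]
    · have hv' : ¬ (qb.2 == v) = true := by simpa [beq_iff_eq] using fun h => hv h.symm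
      simp [hv, hv']

lemma mem_getD_posDict (nl : List Int) (v q : Int) :
    q ∈ PySem.Dict.getD (posDict nl) v []
      ↔ ∃ qb ∈ PySem.List.enumerate nl, qb.2 = v ∧ qb.1 = q := by
  rw [getD_posDict]
  simp only [List.mem_map, List.mem_filter, beq_iff_eq]
  constructor
  · rintro ⟨qb, ⟨h1, h2⟩, h3⟩; exact ⟨qb, h1, h2, h3⟩
  · rintro ⟨qb, h1, h2, h3⟩; exact ⟨qb, ⟨h1, h2⟩, h3⟩

lemma mem_badShifts (ml nl : List Int) (d : Int) :
    d ∈ badShifts ml nl ↔ ConflictAt ml nl d := by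
  have houter : ∀ (s : List Int) (e : Int × Int) (x : Int),
      x ∈ (PySem.Dict.getD (posDict nl) (4 - e.2) []).foldl (fun s q => PySem.Set.add s (q - e.1)) s
        ↔ x ∈ s ∨ ∃ qb ∈ PySem.List.enumerate nl, e.2 + qb.2 = 4 ∧ x = qb.1 - e.1 := by
    intro s e x
    rw [mem_foldl_iff _ (fun (q : Int) (x : Int) => x = q - e.1)
        (fun s' q x' => PySem.Set.mem_add s' (q - e.1) x')]
    constructor
    · rintro (hs | ⟨q, hq, rfl⟩)
      · exact Or.inl hs
      · obtain ⟨qb, hqb, hv, rfl⟩ := (mem_getD_posDict nl (4 - e.2) q).mp hq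
        exact Or.inr ⟨qb, hqb, by omega, rfl⟩
    · rintro (hs | ⟨qb, hqb, hsum, rfl⟩)
      · exact Or.inl hs
      · exact Or.inr ⟨qb.1, (mem_getD_posDict nl (4 - e.2) qb.1).mpr ⟨qb, hqb, by omega, rfl⟩, rfl⟩
  unfold badShifts ConflictAt
  rw [mem_foldl_iff _ (fun (pa : Int × Int) (x : Int) =>
      ∃ qb ∈ PySem.List.enumerate nl, pa.2 + qb.2 = 4 ∧ x = qb.1 - pa.1) houter]
  simp [PySem.Set.empty]

lemma check_left (ml nl : List Int) (i : Int) (hi : 0 ≤ i) :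
    check_conflict ml 0 nl i = true ↔ ConflictAt ml nl i := by
  unfold check_conflict ConflictAt
  simp only [List.any_eq_true, PySem.List.mem_pyRange_one, PySem.List.mem_enumerate_iff, beq_iff_eq]
  constructor
  · rintro ⟨t, ⟨ht0, htln⟩, hsum⟩
    have h1 : (0 : Int) + t < (ml.length : Int) := by omega
    have h2 : i + t < (nl.length : Int) := by omega
    rw [PySem.List.pyGetD_eq_getElem ml 0 (by omega) h1,
        PySem.List.pyGetD_eq_getElem nl 0 (by omega) h2] at hsum
    refine ⟨(0 + (((0 : Int) + t).toNat : Int), ml[((0 : Int) + t).toNat]'(by omega)),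
            ⟨((0 : Int) + t).toNat, by omega, rfl⟩,
            (0 + ((i + t).toNat : Int), nl[(i + t).toNat]'(by omega)),
            ⟨(i + t).toNat, by omega, rfl⟩, hsum, by dsimp only; omega⟩
  · rintro ⟨pa, ⟨p, hp, rfl⟩, qb, ⟨q, hq, rfl⟩, hsum, hd⟩
    dsimp only at hsum hd
    refine ⟨(p : Int), ⟨by omega, by omega⟩, ?_⟩
    have h1 : (0 : Int) + (p : Int) < (ml.length : Int) := by omega
    have h2 : i + (p : Int) < (nl.length : Int) := by omega
    rw [PySem.List.pyGetD_eq_getElem ml 0 (by omega) h1,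
        PySem.List.pyGetD_eq_getElem nl 0 (by omega) h2]
    have e1 : ((0 : Int) + (p : Int)).toNat = p := by omega
    have e2 : (i + (p : Int)).toNat = q := by omega
    simp only [e1, e2]
    exact hsum

lemma check_right (ml nl : List Int) (j : Int) (hj : 0 ≤ j) :
    check_conflict ml j nl 0 = true ↔ ConflictAt ml nl (-j) := by
  unfold check_conflict ConflictAt
  simp only [List.any_eq_true, PySem.List.mem_pyRange_one, PySem.List.mem_enumerate_iff, beq_iff_eq]
  constructor
  · rintro ⟨t, ⟨ht0, htln⟩, hsum⟩
    have h1 : j + t < (ml.length : Int) := by omega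
    have h2 : (0 : Int) + t < (nl.length : Int) := by omega
    rw [PySem.List.pyGetD_eq_getElem ml 0 (by omega) h1,
        PySem.List.pyGetD_eq_getElem nl 0 (by omega) h2] at hsum
    refine ⟨(0 + ((j + t).toNat : Int), ml[(j + t).toNat]'(by omega)),
            ⟨(j + t).toNat, by omega, rfl⟩,
            (0 + (((0 : Int) + t).toNat : Int), nl[((0 : Int) + t).toNat]'(by omega)),
            ⟨((0 : Int) + t).toNat, by omega, rfl⟩, hsum, by dsimp only; omega⟩
  · rintro ⟨pa, ⟨p, hp, rfl⟩, qb, ⟨q, hq, rfl⟩, hsum, hd⟩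
    dsimp only at hsum hd
    refine ⟨(q : Int), ⟨by omega, by omega⟩, ?_⟩
    have h1 : j + (q : Int) < (ml.length : Int) := by omega
    have h2 : (0 : Int) + (q : Int) < (nl.length : Int) := by omega
    rw [PySem.List.pyGetD_eq_getElem ml 0 (by omega) h1,
        PySem.List.pyGetD_eq_getElem nl 0 (by omega) h2]
    have e1 : (j + (q : Int)).toNat = p := by omega
    have e2 : ((0 : Int) + (q : Int)).toNat = q := by omega
    simp only [e1, e2]
    exact hsum

lemma check_eq_contains_left (ml nl : List Int) (i : Int) (hi : 0 ≤ i) :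
    check_conflict ml 0 nl i = PySem.Set.contains (badShifts ml nl) i := by
  rw [Bool.eq_iff_iff, check_left ml nl i hi, PySem.Set.contains_iff, mem_badShifts]

lemma check_eq_contains_right (ml nl : List Int) (j : Int) (hj : 0 ≤ j) :
    check_conflict ml j nl 0 = PySem.Set.contains (badShifts ml nl) (-j) := by
  rw [Bool.eq_iff_iff, check_right ml nl j hj, PySem.Set.contains_iff, mem_badShifts]

-- ===== VERDICT (by name: the statement is the Claim_ definition above) =====
theorem num_possible_cases_spec : Claim_equal_num_possible_cases := by
  intro pr _
  obtain ⟨m, n, k, ml, nl⟩ := pr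
  unfold Spec_num_possible_cases num_possible_cases num_possible_cases_alt
  dsimp only
  congr 1
  have h1 : (PySem.List.pyRange 0 (k - m + 1) 1).foldl (fun acc i =>
      if !check_conflict ml 0 nl i then acc + (k - max (m + i) n + 1) else acc) 0
      = (PySem.List.pyRange 0 (k - m + 1) 1).foldl (fun acc i =>
      if !PySem.Set.contains (badShifts ml nl) i then acc + (k + 1 - max (m + i) n) else acc) 0 := by
    apply PySem.List.foldl_congr_mem
    intro acc x hx
    have hx0 : (0 : Int) ≤ x := (PySem.List.mem_pyRange_one.mp hx).1
    rw [check_eq_contains_left ml nl x hx0]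
    split
    · ring
    · rfl
  rw [h1]
  apply PySem.List.foldl_congr_mem
  intro acc x hx
  have hx0 : (0 : Int) ≤ x := by
    have := (PySem.List.mem_pyRange_one.mp hx).1; omega
  rw [check_eq_contains_right ml nl x hx0]
  split
  · ring
  · rfl
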